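-- pv_equiv track=rewrite | github.com/Austin-MgKaung/AES_128_Verilog | model/subbytes_aglorithmic.py | _affine_transform
-- ===== SOURCE A (Python) =====
-- def _affine_transform(b: int) -> int:
--     """
--     Applies the forward affine transformation (for SubBytes).
--     """
--     c = 0x63
--     bits = [(b >> i) & 1 for i in range(8)]
--
--     r0 = bits[0] ^ bits[4] ^ bits[5] ^ bits[6] ^ bits[7]
--     r1 = bits[1] ^ bits[5] ^ bits[6] ^ bits[7] ^ bits[0]
--     r2 = bits[2] ^ bits[6] ^ bits[7] ^ bits[0] ^ bits[1]
--     r3 = bits[3] ^ bits[7] ^ bits[0] ^ bits[1] ^ bits[2]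
--     r4 = bits[4] ^ bits[0] ^ bits[1] ^ bits[2] ^ bits[3]
--     r5 = bits[5] ^ bits[1] ^ bits[2] ^ bits[3] ^ bits[4]
--     r6 = bits[6] ^ bits[2] ^ bits[3] ^ bits[4] ^ bits[5]
--     r7 = bits[7] ^ bits[3] ^ bits[4] ^ bits[5] ^ bits[6]
--
--     result_bits = [r0, r1, r2, r3, r4, r5, r6, r7]
--
--     result_byte = 0
--     for i in range(8):
--         result_byte |= (result_bits[i] << i)
--
--     return result_byte ^ c
-- ===== SOURCE B (Python) =====
-- def _affine_transform(b: int) -> int: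
--     """Same affine transform, computed with byte rotations instead of per-bit equations."""
--     def rotl(x: int, k: int) -> int:
--         return ((x << k) | (x >> (8 - k))) & 0xFF
--     v = b & 0xFF
--     return v ^ rotl(v, 1) ^ rotl(v, 2) ^ rotl(v, 3) ^ rotl(v, 4) ^ 0x63
-- ===== Notes on version B (the rewrite author's own statement) =====
-- stated objective: idiomatic
-- what changed: Replaces the eight hand-written per-bit XOR equations and the bit-reassembly loop by the standard rotation identity s = v ^ rotl(v,1) ^ rotl(v,2) ^ rotl(v,3) ^ rotl(v,4) ^ 0x63 computed directly on the masked byte v = b & 0xFF.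
import Mathlib
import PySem

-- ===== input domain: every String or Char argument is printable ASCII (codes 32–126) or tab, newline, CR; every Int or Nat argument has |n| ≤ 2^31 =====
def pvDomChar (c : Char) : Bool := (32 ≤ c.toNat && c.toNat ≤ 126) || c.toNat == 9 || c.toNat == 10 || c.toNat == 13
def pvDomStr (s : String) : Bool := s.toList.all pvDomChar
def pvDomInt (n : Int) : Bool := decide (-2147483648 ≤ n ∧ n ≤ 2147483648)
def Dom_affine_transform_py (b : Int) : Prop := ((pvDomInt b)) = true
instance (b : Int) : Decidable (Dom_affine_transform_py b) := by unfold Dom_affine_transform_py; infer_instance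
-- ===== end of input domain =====

-- B replaces the eight per-bit XOR equations by the classical rotation form
-- v ^ rotl(v,1) ^ rotl(v,2) ^ rotl(v,3) ^ rotl(v,4) ^ 0x63 on the masked byte (idiomatic, no speed claim).


-- ===== PORT A =====
def affine_transform_py (b : Int) : Int :=
  let c : Int := 0x63
  let bits : List Int := (PySem.List.pyRange 0 8 1).map (fun i => PySem.Int.band (b >>> i.toNat) 1)
  let r0 := PySem.Int.bxor (PySem.Int.bxor (PySem.Int.bxor (PySem.Int.bxor (PySem.List.pyGetD bits 0 0) (PySem.List.pyGetD bits 4 0)) (PySem.List.pyGetD bits 5 0)) (PySem.List.pyGetD bits 6 0)) (PySem.List.pyGetD bits 7 0)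
  let r1 := PySem.Int.bxor (PySem.Int.bxor (PySem.Int.bxor (PySem.Int.bxor (PySem.List.pyGetD bits 1 0) (PySem.List.pyGetD bits 5 0)) (PySem.List.pyGetD bits 6 0)) (PySem.List.pyGetD bits 7 0)) (PySem.List.pyGetD bits 0 0)
  let r2 := PySem.Int.bxor (PySem.Int.bxor (PySem.Int.bxor (PySem.Int.bxor (PySem.List.pyGetD bits 2 0) (PySem.List.pyGetD bits 6 0)) (PySem.List.pyGetD bits 7 0)) (PySem.List.pyGetD bits 0 0)) (PySem.List.pyGetD bits 1 0)
  let r3 := PySem.Int.bxor (PySem.Int.bxor (PySem.Int.bxor (PySem.Int.bxor (PySem.List.pyGetD bits 3 0) (PySem.List.pyGetD bits 7 0)) (PySem.List.pyGetD bits 0 0)) (PySem.List.pyGetD bits 1 0)) (PySem.List.pyGetD bits 2 0)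
  let r4 := PySem.Int.bxor (PySem.Int.bxor (PySem.Int.bxor (PySem.Int.bxor (PySem.List.pyGetD bits 4 0) (PySem.List.pyGetD bits 0 0)) (PySem.List.pyGetD bits 1 0)) (PySem.List.pyGetD bits 2 0)) (PySem.List.pyGetD bits 3 0)
  let r5 := PySem.Int.bxor (PySem.Int.bxor (PySem.Int.bxor (PySem.Int.bxor (PySem.List.pyGetD bits 5 0) (PySem.List.pyGetD bits 1 0)) (PySem.List.pyGetD bits 2 0)) (PySem.List.pyGetD bits 3 0)) (PySem.List.pyGetD bits 4 0)
  let r6 := PySem.Int.bxor (PySem.Int.bxor (PySem.Int.bxor (PySem.Int.bxor (PySem.List.pyGetD bits 6 0) (PySem.List.pyGetD bits 2 0)) (PySem.List.pyGetD bits 3 0)) (PySem.List.pyGetD bits 4 0)) (PySem.List.pyGetD bits 5 0)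
  let r7 := PySem.Int.bxor (PySem.Int.bxor (PySem.Int.bxor (PySem.Int.bxor (PySem.List.pyGetD bits 7 0) (PySem.List.pyGetD bits 3 0)) (PySem.List.pyGetD bits 4 0)) (PySem.List.pyGetD bits 5 0)) (PySem.List.pyGetD bits 6 0)
  let result_bits := [r0, r1, r2, r3, r4, r5, r6, r7]
  let result_byte := (PySem.List.pyRange 0 8 1).foldl
    (fun acc i => PySem.Int.bor acc ((PySem.List.pyGetD result_bits i 0) <<< i.toNat)) 0
  PySem.Int.bxor result_byte c

-- ===== PORT B =====
-- rotl(x, k) = ((x << k) | (x >> (8 - k))) & 0xFF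
def pvRotl (x : Int) (k : Int) : Int :=
  PySem.Int.band (PySem.Int.bor (x <<< k.toNat) (x >>> (8 - k).toNat)) 0xFF

def affine_transform_py_alt (b : Int) : Int :=
  let v := PySem.Int.band b 0xFF
  PySem.Int.bxor (PySem.Int.bxor (PySem.Int.bxor (PySem.Int.bxor (PySem.Int.bxor v (pvRotl v 1)) (pvRotl v 2)) (pvRotl v 3)) (pvRotl v 4)) 0x63

-- ===== PRECONDITION & SPEC =====
def Spec_affine_transform_py (b : Int) (out : Int) : Prop := out = affine_transform_py_alt b
instance (b : Int) (out : Int) : Decidable (Spec_affine_transform_py b out) := by unfold Spec_affine_transform_py; infer_instance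

-- ===== CLAIM (what is proved, stated in full; the proofs are below) =====
def Claim_equal_affine_transform_py : Prop := ∀ (b : Int), Dom_affine_transform_py b → Spec_affine_transform_py b (affine_transform_py b)

-- ===== LEMMAS AND PROOFS =====

-- Python's b & 0xFF is b mod 256 (also for negative b).
theorem pv_band_255 (b : Int) : PySem.Int.band b 255 = b % 256 := by
  unfold PySem.Int.band
  have h1 : ∀ n : Nat, n &&& 255 = n % 256 := by
    intro n; have := Nat.and_two_pow_sub_one_eq_mod n 8; norm_num at this; omega
  have e : Int.toNat 255 = 255 := rfl
  split_ifs with h h2 h3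
  · rw [e, h1]; omega
  · omega
  · rw [e, Nat.land_comm, h1]; omega
  · omega

-- Bit i (0 ≤ i < 8) of b only depends on b mod 256.
theorem pv_bit_congr (i : Nat) (hi : i < 8) (b : Int) :
    PySem.Int.band (b >>> i) 1 = PySem.Int.band ((b % 256) >>> i) 1 := by
  rw [PySem.Int.band_one, PySem.Int.band_one]
  show PySem.Int.mod (b >>> i) 2 = PySem.Int.mod ((b % 256) >>> i) 2
  simp only [PySem.Int.mod, Int.shiftRight_eq_div_pow]
  show (b / 2 ^ i).fmod 2 = ((b % 256) / 2 ^ i).fmod 2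
  have h2 : ∀ x : Int, x.fmod 2 = x % 2 := by intro x; rw [Int.fmod_eq_emod_of_nonneg]; norm_num
  rw [h2, h2]
  interval_cases i <;> norm_num <;> omega

set_option maxRecDepth 100000 in
theorem pv_all_bytes : ∀ v : Fin 256, affine_transform_py (v.val : Int) = affine_transform_py_alt (v.val : Int) := by decide

-- ===== VERDICT (by name: the statement is the Claim_ definition above) =====
theorem affine_transform_py_spec : Claim_equal_affine_transform_py := by
  intro b _
  show affine_transform_py b = affine_transform_py_alt b
  have hr0 : 0 ≤ b % 256 := Int.emod_nonneg b (by norm_num)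
  have hr1 : b % 256 < 256 := Int.emod_lt_of_pos b (by norm_num)
  have hA : affine_transform_py b = affine_transform_py (b % 256) := by
    unfold affine_transform_py
    simp only [show PySem.List.pyRange 0 8 1 = [0, 1, 2, 3, 4, 5, 6, 7] from by decide,
      List.map, show Int.toNat 0 = 0 from rfl, show Int.toNat 1 = 1 from rfl,
      show Int.toNat 2 = 2 from rfl, show Int.toNat 3 = 3 from rfl,
      show Int.toNat 4 = 4 from rfl, show Int.toNat 5 = 5 from rfl,
      show Int.toNat 6 = 6 from rfl, show Int.toNat 7 = 7 from rfl,
      Int.shiftRight_natCast_right]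
    rw [pv_bit_congr 0 (by norm_num), pv_bit_congr 1 (by norm_num), pv_bit_congr 2 (by norm_num),
        pv_bit_congr 3 (by norm_num), pv_bit_congr 4 (by norm_num), pv_bit_congr 5 (by norm_num),
        pv_bit_congr 6 (by norm_num), pv_bit_congr 7 (by norm_num)]
  have hB : affine_transform_py_alt b = affine_transform_py_alt (b % 256) := by
    unfold affine_transform_py_alt
    rw [show (0xFF : Int) = 255 from rfl, pv_band_255, pv_band_255, Int.emod_emod_of_dvd b (by norm_num)]
  have hv := pv_all_bytes ⟨(b % 256).toNat, by omega⟩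
  simp only [Int.toNat_of_nonneg hr0] at hv
  rw [hA, hB, hv]
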